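-- pv_equiv track=rewrite | github.com/yesimyalc/CSE454-Data-Mining-Project | dataPreprocessing.py | retrieveInfo
-- ===== SOURCE A (Python) =====
-- def retrieveInfo(rows, count, underSampling):
--     #Retrieve unique cusine names, their amount, unique ingredient names
--     ingredients=[]
--     ingredientCount=[]
--     cuisines=[]
--     cuisineMealCount=[]
--     i=0
--     while i < len(rows):
--         mealIngredients=[]
--         for ingredient in rows[i]:
--             if ingredient not in mealIngredients:
--                 mealIngredients.append(ingredient)
--         mealIngredients.pop(0)
--
--         if len(mealIngredients) <count:
--             if underSampling and (rows[i][0]=="EastAsian" or rows[i][0]=="WesternEuropean" or rows[i][0]=="SouthAsian" or rows[i][0]=="SoutheastAsian"):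
--                 rows.pop(i)
--                 continue
--             elif not underSampling:
--                 rows.pop(i)
--                 continue
--
--         if rows[i][0] not in cuisines:
--             cuisines.append(rows[i][0])
--         index=cuisines.index(rows[i][0])
--         if len(cuisineMealCount)<=index:
--             cuisineMealCount.append(1)
--         else:
--             cuisineMealCount[index]+=1
--
--         for ingredient in mealIngredients:
--             if ingredient not in ingredients:
--                 ingredients.append(ingredient)
--             index=ingredients.index(ingredient)
--             if len(ingredientCount)<=index:
--                 ingredientCount.append(1)
--             else:
--                 ingredientCount[index]+=1
--         i+=1
--
--     return rows, ingredients, ingredientCount, cuisines, cuisineMealCount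
-- ===== SOURCE B (Python) =====
-- def retrieveInfo(rows, count, underSampling):
--     # Stream-and-count: filter rows in place, then materialise the flat streams of
--     # cuisine names and per-meal deduped ingredients; names are the order-preserving
--     # dedup of each stream and each count is a closed-form stream.count(name) --
--     # no incremental tally state at all. Mutates rows in place like A; the proof
--     # covers the return value.
--     special = ("EastAsian", "WesternEuropean", "SouthAsian", "SoutheastAsian")
--     rows[:] = [r for r in rows
--                if len(dict.fromkeys(r)) - 1 >= count
--                or (underSampling and r[0] not in special)]
--
--     cuisineStream = [r[0] for r in rows]
--     ingredientStream = [x for r in rows for x in list(dict.fromkeys(r))[1:]]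
--
--     cuisines = list(dict.fromkeys(cuisineStream))
--     ingredients = list(dict.fromkeys(ingredientStream))
--     cuisineMealCount = [cuisineStream.count(c) for c in cuisines]
--     ingredientCount = [ingredientStream.count(x) for x in ingredients]
--     return rows, ingredients, ingredientCount, cuisines, cuisineMealCount
-- ===== Notes on version B (the rewrite author's own statement) =====
-- stated objective: alternative
-- what changed: A interleaves filtering and tallying in one index-managed while loop that pops from rows and maintains parallel name/count lists via list.index scans and append-vs-increment updates; B keeps no tally state at all: it filters rows, materialises the flat cuisine and deduped-ingredient streams, dedups each stream once for the name lists, and obtains every count as a closed-form stream.count(name).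
import Mathlib
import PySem

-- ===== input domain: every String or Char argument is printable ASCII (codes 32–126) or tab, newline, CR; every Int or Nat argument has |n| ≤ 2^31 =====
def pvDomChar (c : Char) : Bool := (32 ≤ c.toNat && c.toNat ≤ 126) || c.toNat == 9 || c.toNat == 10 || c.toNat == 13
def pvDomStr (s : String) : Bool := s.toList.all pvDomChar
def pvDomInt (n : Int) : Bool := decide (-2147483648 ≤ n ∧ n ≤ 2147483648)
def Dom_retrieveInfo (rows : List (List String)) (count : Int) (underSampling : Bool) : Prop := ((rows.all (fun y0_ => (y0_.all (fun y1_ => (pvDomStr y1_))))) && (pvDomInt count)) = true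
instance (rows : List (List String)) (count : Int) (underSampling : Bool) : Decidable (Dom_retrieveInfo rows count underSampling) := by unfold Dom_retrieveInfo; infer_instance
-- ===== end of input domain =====

-- B replaces A's single index-managed while loop (filter by popping from rows, incremental tally
-- via parallel name/count lists and list.index) by a stateless stream-and-count scheme: filter the
-- rows, materialise the flat cuisine and deduped-ingredient streams, dedup each stream for the name
-- lists and read each count off as stream.count(name). Both A and B mutate `rows` in place
-- (A pops, B slice-assigns); the theorems here are about the RETURN value only.

-- ===== PORT A =====
-- A's duplicated tally snippet ('if name not in names: append; index=names.index(name); append 1 or += 1')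
def tallyA (names : List String) (counts : List Int) (c : String) : List String × List Int :=
  let names' := if names.contains c then names else names ++ [c]
  match PySem.List.index? names' c with
  | some idx =>
    if counts.length ≤ idx then (names', counts ++ [1])
    else (names', counts.set idx (counts.getD idx 0 + 1))
  | none => (names', counts)   -- unreachable: c ∈ names'

def retrieveInfoGo (count : Int) (underSampling : Bool) :
    List (List String) → List (List String) → List String → List Int → List String → List Int →
    List (List String) × List String × List Int × List String × List Int
  | [], kept, ing, ingC, cui, cuiC => (kept, ing, ingC, cui, cuiC)
  | row :: rest, kept, ing, ingC, cui, cuiC =>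
    let meal := row.foldl (fun acc x => if acc.contains x then acc else acc ++ [x]) []
    match PySem.List.pop? meal 0 with
    | none => (kept ++ row :: rest, ing, ingC, cui, cuiC)   -- Python: mealIngredients.pop(0) raises IndexError (empty row); outside Pre_
    | some (_, mi) =>
      let r0 := (PySem.List.pyGet? row 0).getD ""           -- rows[i][0]; row is nonempty here
      if (mi.length : Int) < count &&
         (underSampling && (r0 == "EastAsian" || r0 == "WesternEuropean" || r0 == "SouthAsian" || r0 == "SoutheastAsian")
          || !underSampling)
      then retrieveInfoGo count underSampling rest kept ing ingC cui cuiC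
      else
        let p1 := tallyA cui cuiC r0
        let p2 := mi.foldl (fun (p : List String × List Int) x => tallyA p.1 p.2 x) (ing, ingC)
        retrieveInfoGo count underSampling rest (kept ++ [row]) p2.1 p2.2 p1.1 p1.2

def retrieveInfo (rows : List (List String)) (count : Int) (underSampling : Bool) : List (List String) × List String × List Int × List String × List Int :=
  retrieveInfoGo count underSampling rows [] [] [] [] []

-- ===== PORT B =====
def keepB (count : Int) (underSampling : Bool) (row : List String) : Bool :=
  decide (((PySem.List.dedup row).length : Int) - 1 ≥ count) ||
  (underSampling && !(["EastAsian", "WesternEuropean", "SouthAsian", "SoutheastAsian"].contains ((PySem.List.pyGet? row 0).getD "")))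

def retrieveInfo_alt (rows : List (List String)) (count : Int) (underSampling : Bool) : List (List String) × List String × List Int × List String × List Int :=
  let kept := rows.filter (keepB count underSampling)
  let cuisineStream := kept.map (fun r => (PySem.List.pyGet? r 0).getD "")
  let ingredientStream := kept.flatMap (fun r => PySem.List.slice (PySem.List.dedup r) (some 1))
  let cuisines := PySem.List.dedup cuisineStream
  let ingredients := PySem.List.dedup ingredientStream
  let cuisineMealCount := cuisines.map (fun c => (PySem.List.count cuisineStream c : Int))
  let ingredientCount := ingredients.map (fun x => (PySem.List.count ingredientStream x : Int))
  (kept, ingredients, ingredientCount, cuisines, cuisineMealCount)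

-- ===== PRECONDITION & SPEC =====
-- Pre_ excludes rows containing an empty row: there A raises IndexError (mealIngredients.pop(0) on []).
def Pre_retrieveInfo (rows : List (List String)) (count : Int) (underSampling : Bool) : Prop :=
  ∀ r ∈ rows, r ≠ []
instance (rows : List (List String)) (count : Int) (underSampling : Bool) : Decidable (Pre_retrieveInfo rows count underSampling) := by unfold Pre_retrieveInfo; infer_instance

def pvWitness_retrieveInfo : List (List String) × Int × Bool :=
  ([["EastAsian", "soy", "rice"], ["Greek", "feta"], ["EastAsian", "soy", "EastAsian"]], 2, true)

def Spec_retrieveInfo (rows : List (List String)) (count : Int) (underSampling : Bool) (out : List (List String) × List String × List Int × List String × List Int) : Prop := out = retrieveInfo_alt rows count underSampling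
instance (rows : List (List String)) (count : Int) (underSampling : Bool) (out : List (List String) × List String × List Int × List String × List Int) : Decidable (Spec_retrieveInfo rows count underSampling out) := by unfold Spec_retrieveInfo; infer_instance

-- ===== CLAIM (what is proved, stated in full; the proofs are below) =====
def Claim_equal_retrieveInfo : Prop := ∀ (rows : List (List String)) (count : Int) (underSampling : Bool), Dom_retrieveInfo rows count underSampling → Pre_retrieveInfo rows count underSampling → Spec_retrieveInfo rows count underSampling (retrieveInfo rows count underSampling)

-- ===== LEMMAS AND PROOFS =====

-- characterisation of A's parallel (names, counts) state after tallying a list P of names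
def chN (P : List String) : List String := PySem.List.dedup P
def chC (P : List String) : List Int := (PySem.List.dedup P).map (fun k => (List.count k P : Int))

def hdB (row : List String) : String := (PySem.List.pyGet? row 0).getD ""
def miB (row : List String) : List String := PySem.List.slice (PySem.List.dedup row) (some 1)

theorem index?_nodup (l : List String) (c : String) (hnd : l.Nodup) (h : c ∈ l) :
    PySem.List.index? l c = some (l.idxOf c) := by
  rw [PySem.List.index?_eq_idxOf?, List.idxOf?_eq_some_iff]
  refine ⟨List.idxOf_lt_length_of_mem h, List.getElem_idxOf _, fun j hj => ?_⟩
  intro he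
  have hl : j < l.length := lt_of_lt_of_le hj (List.idxOf_le_length)
  have := hnd.idxOf_getElem j hl
  rw [he] at this
  omega

theorem tallyA_char (P : List String) (c : String) :
    tallyA (chN P) (chC P) c = (chN (P ++ [c]), chC (P ++ [c])) := by
  by_cases hc : c ∈ P
  · have hmem : c ∈ PySem.List.dedup P := by simp [pysem, hc]
    have hnd := PySem.List.nodup_dedup (α := String) P
    have hN : chN (P ++ [c]) = chN P := by simp [chN, pysem, PySem.Set.add, PySem.Set.contains, hc]
    simp only [tallyA, chN, chC]
    rw [if_pos (by simpa using hmem), index?_nodup _ _ hnd hmem]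
    have hlt : (PySem.List.dedup P).idxOf c < (PySem.List.dedup P).length := List.idxOf_lt_length_of_mem hmem
    dsimp only
    rw [if_neg (by rw [List.length_map]; omega)]
    simp only [Prod.mk.injEq]
    constructor
    · simpa [chN] using hN.symm
    · rw [show PySem.List.dedup (P ++ [c]) = PySem.List.dedup P from by simpa [chN] using hN]
      apply List.ext_getElem
      · simp
      · intro j hj hj'
        simp only [List.getElem_set, List.getElem_map, List.count_append]
        have hjlen : j < (PySem.List.dedup P).length := by simpa using hj'
        by_cases hji : j = (PySem.List.dedup P).idxOf c
        · subst hji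
          rw [if_pos rfl]
          have hget : (PySem.List.dedup P)[(PySem.List.dedup P).idxOf c] = c := List.getElem_idxOf _
          rw [hget]
          rw [List.getD_eq_getElem _ _ (by simpa using hlt)]
          simp [List.count_singleton]
        · rw [if_neg (Ne.symm hji)]
          have hne : (PySem.List.dedup P)[j] ≠ c := by
            intro he
            have := hnd.idxOf_getElem j hjlen
            rw [he] at this
            exact hji this.symm
          have hne' : ¬ c = (PySem.Set.ofList P)[j]'(by simpa [PySem.List.dedup] using hjlen) := by
            intro he; exact hne (by simpa [PySem.List.dedup] using he.symm)
          simp [List.count_singleton, hne']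
          exact hne'
  · have hnmem : c ∉ PySem.List.dedup P := by simp [pysem, hc]
    have hN : chN (P ++ [c]) = chN P ++ [c] := by simp [chN, pysem, PySem.Set.add, PySem.Set.contains, hc]
    simp only [tallyA, chN, chC]
    rw [if_neg (by simpa using hnmem)]
    have hidx : PySem.List.index? (PySem.List.dedup P ++ [c]) c = some (PySem.List.dedup P).length := by
      have hnd' : (PySem.List.dedup P ++ [c]).Nodup := by
        simp [List.nodup_append]
        intro a ha he
        exact absurd (he ▸ ha) hc
      rw [index?_nodup _ _ hnd' (by simp)]
      congr 1
      rw [List.idxOf_append]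
      simp [hc]
    rw [hidx]
    dsimp only
    rw [if_pos (by simp)]
    simp only [Prod.mk.injEq]
    constructor
    · simpa [chN] using hN.symm
    · rw [show PySem.List.dedup (P ++ [c]) = PySem.List.dedup P ++ [c] from by simpa [chN] using hN]
      rw [List.map_append]
      congr 1
      · apply List.map_congr_left
        intro k hk
        have : k ≠ c := fun he => hnmem (he ▸ hk)
        have hne' : ¬ c = k := fun he => this he.symm
        simp [List.count_append, List.count_singleton, hne']
      · simp [List.count_append, List.count_singleton, List.count_eq_zero.mpr hc]

theorem foldl_add_head (xs : List String) (a : String) (s : List String) :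
    ∃ t, xs.foldl PySem.Set.add (a :: s) = a :: t := by
  induction xs generalizing s with
  | nil => exact ⟨s, rfl⟩
  | cons x xs ih =>
    simp only [List.foldl_cons]
    by_cases hx : x = a ∨ x ∈ s
    · rw [show PySem.Set.add (a :: s) x = a :: s from by simp [PySem.Set.add, PySem.Set.contains, hx]]
      exact ih s
    · rw [show PySem.Set.add (a :: s) x = a :: (s ++ [x]) from by
        rcases not_or.mp hx with ⟨h1, h2⟩
        simp [PySem.Set.add, PySem.Set.contains, h1, h2]]
      exact ih (s ++ [x])

theorem dedup_cons_head (a : String) (as : List String) :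
    ∃ t, PySem.List.dedup (a :: as) = a :: t := by
  have : PySem.List.dedup (a :: as) = as.foldl PySem.Set.add (a :: []) := by
    simp [PySem.List.dedup_eq_ofList, PySem.Set.ofList_eq_foldl, List.foldl_cons, PySem.Set.add, PySem.Set.contains]
  rw [this]
  exact foldl_add_head as a []

theorem foldTally_char (Q P : List String) :
    Q.foldl (fun (p : List String × List Int) x => tallyA p.1 p.2 x) (chN P, chC P)
      = (chN (P ++ Q), chC (P ++ Q)) := by
  induction Q generalizing P with
  | nil => simp
  | cons q Q ih =>
    simp only [List.foldl_cons, tallyA_char]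
    rw [show (chN (P ++ [q]), chC (P ++ [q])) = ((chN (P ++ [q]), chC (P ++ [q])).1, (chN (P ++ [q]), chC (P ++ [q])).2) from rfl]
    simp only []
    rw [ih (P ++ [q])]
    simp

theorem drop_eq_not_keepB (count : Int) (underSampling : Bool) (a : String) (as t : List String)
    (ht : PySem.List.dedup (a :: as) = a :: t) :
    ((t.length : Int) < count &&
        (underSampling && (a == "EastAsian" || a == "WesternEuropean" || a == "SouthAsian" || a == "SoutheastAsian") || !underSampling))
        = !keepB count underSampling (a :: as) := by
  have ht' : PySem.Set.ofList (a :: as) = a :: t := by simpa [PySem.List.dedup] using ht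
  rw [Bool.eq_iff_iff]
  simp [keepB, ht', PySem.List.pyGet?, PySem.List.pyIdx?]
  cases underSampling <;> simp <;>
    first
      | omega
      | (intro _; tauto)

theorem go_char (count : Int) (underSampling : Bool) (remaining : List (List String))
    (h : ∀ r ∈ remaining, r ≠ []) (kept : List (List String)) (PI PC : List String) :
    retrieveInfoGo count underSampling remaining kept (chN PI) (chC PI) (chN PC) (chC PC)
      = (kept ++ remaining.filter (keepB count underSampling),
         chN (PI ++ (remaining.filter (keepB count underSampling)).flatMap miB),
         chC (PI ++ (remaining.filter (keepB count underSampling)).flatMap miB),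
         chN (PC ++ (remaining.filter (keepB count underSampling)).map hdB),
         chC (PC ++ (remaining.filter (keepB count underSampling)).map hdB)) := by
  revert h
  induction remaining generalizing kept PI PC with
  | nil => intro h; simp [retrieveInfoGo]
  | cons row rest ih =>
    intro h
    have hrest : ∀ r ∈ rest, r ≠ [] := fun r hr => h r (List.mem_cons_of_mem _ hr)
    obtain ⟨a, as, rfl⟩ : ∃ a as, row = a :: as := by
      cases row with
      | nil => exact absurd rfl (h [] (by simp))
      | cons a as => exact ⟨a, as, rfl⟩
    obtain ⟨t, ht⟩ := dedup_cons_head a as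
    have hmeal : (a :: as).foldl (fun acc x => if acc.contains x then acc else acc ++ [x]) ([] : List String) = a :: t := by
      rw [show (a :: as).foldl (fun acc x => if acc.contains x then acc else acc ++ [x]) ([] : List String) = PySem.List.dedup (a :: as) from rfl, ht]
    have hr0 : ((PySem.List.pyGet? (a :: as) 0).getD "") = a := by simp [PySem.List.pyGet?, PySem.List.pyIdx?]
    have hmiB : miB (a :: as) = t := by
      rw [miB, ht, PySem.List.slice_from _ (by norm_num)]; simp
    have hhdB : hdB (a :: as) = a := hr0
    simp only [retrieveInfoGo, hmeal]
    rw [show PySem.List.pop? (a :: t) 0 = some (a, t) from by simp [PySem.List.pop?, PySem.List.pyIdx?]]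
    dsimp only
    rw [hr0, drop_eq_not_keepB count underSampling a as t ht]
    by_cases hk : keepB count underSampling (a :: as)
    · rw [hk]
      simp only [Bool.not_true, if_neg (by simp : ¬ (false = true))]
      rw [tallyA_char, foldTally_char]
      dsimp only
      rw [ih (kept ++ [a :: as]) (PI ++ t) (PC ++ [a]) hrest]
      simp [List.filter_cons, hk, hmiB, hhdB, List.append_assoc]
    · rw [Bool.not_eq_true] at hk
      rw [hk]
      simp only [Bool.not_false, if_true]
      rw [ih kept PI PC hrest]
      simp [hk]

theorem alt_char (rows : List (List String)) (count : Int) (underSampling : Bool) :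
    retrieveInfo_alt rows count underSampling
      = (rows.filter (keepB count underSampling),
         chN ((rows.filter (keepB count underSampling)).flatMap miB),
         chC ((rows.filter (keepB count underSampling)).flatMap miB),
         chN ((rows.filter (keepB count underSampling)).map hdB),
         chC ((rows.filter (keepB count underSampling)).map hdB)) := by
  simp only [retrieveInfo_alt, PySem.List.count_eq]
  rfl

-- ===== VERDICT (by name: the statement is the Claim_ definition above) =====
theorem retrieveInfo_spec : Claim_equal_retrieveInfo := by
  intro rows count underSampling _hDom hPre
  unfold Spec_retrieveInfo retrieveInfo
  have h0 : ([] : List String) = chN [] := rfl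
  have h1 : ([] : List Int) = chC [] := rfl
  rw [h0, h1, go_char count underSampling rows hPre [] [] [], alt_char]
  simp
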